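-- pv_equiv track=rewrite | github.com/biet-ian/edX_6.00.1x | Final/problem3.py | McNuggets
-- ===== SOURCE A (Python) =====
-- def McNuggets(n):
--     """
--     n is an int
--
--     Returns True if some integer combination of 6, 9 and 20 equals n
--     Otherwise returns False.
--     """
--     # Your Code Here
--     if n < 0:
--         return False
--     a_lim = n // 6
--     b_lim = n // 9
--     c_lim = n // 20
--     for a in range(a_lim+1):
--         if n == 6*a:
--             return True
--         else:
--             for b in range(b_lim+1):
--                 if n == 6*a+9*b:
--                     return True
--                 else:
--                     for c in range(c_lim+1):
--                         if n == 6*a + 9*b + 20*c: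
--                             return True
--     return False
-- ===== SOURCE B (Python) =====
-- def McNuggets(n):
--     """
--     n is an int
--
--     Returns True if some integer combination of 6, 9 and 20 equals n
--     Otherwise returns False.
--     """
--     # 6 and 9 generate exactly {0} union {multiples of 3 that are >= 6},
--     # and 20*c only matters for c in {0,1,2} (larger c in the same residue
--     # class mod 3 leaves a smaller remainder), so an O(1) check suffices.
--     def ok(m):
--         return m >= 0 and m % 3 == 0 and (m == 0 or m >= 6)
--     return ok(n) or ok(n - 20) or ok(n - 40)
-- ===== Notes on version B (the rewrite author's own statement) =====
-- stated objective: faster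
-- what changed: Replaces the triple nested search over all (a,b,c) by a number-theoretic O(1) test: n is a combination iff n, n-20 or n-40 is 0 or a multiple of 3 that is >= 6.
import Mathlib
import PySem

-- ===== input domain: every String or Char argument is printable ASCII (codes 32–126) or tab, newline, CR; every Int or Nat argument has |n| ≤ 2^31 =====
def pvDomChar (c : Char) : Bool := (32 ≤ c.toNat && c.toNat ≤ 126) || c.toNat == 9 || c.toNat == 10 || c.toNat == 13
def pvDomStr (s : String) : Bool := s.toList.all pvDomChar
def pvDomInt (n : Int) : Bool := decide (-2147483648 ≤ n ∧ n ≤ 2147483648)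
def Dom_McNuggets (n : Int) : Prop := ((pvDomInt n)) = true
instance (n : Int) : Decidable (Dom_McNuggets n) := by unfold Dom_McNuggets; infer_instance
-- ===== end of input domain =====

-- B replaces A's O(n^3) triple search by an O(1) residue test; return values are identical.

-- ===== PORT A =====
-- innermost 'for c in range(c_lim+1)' with early return
def McN_c (n a b : Int) : List Int → Bool
  | [] => false
  | c :: rest => if n = 6 * a + 9 * b + 20 * c then true else McN_c n a b rest

-- 'for b in range(b_lim+1)' with early return
def McN_b (n a cLim : Int) : List Int → Bool
  | [] => false
  | b :: rest =>
    if n = 6 * a + 9 * b then true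
    else if McN_c n a b (PySem.List.pyRange 0 (cLim + 1) 1) then true
    else McN_b n a cLim rest

-- 'for a in range(a_lim+1)' with early return
def McN_a (n bLim cLim : Int) : List Int → Bool
  | [] => false
  | a :: rest =>
    if n = 6 * a then true
    else if McN_b n a cLim (PySem.List.pyRange 0 (bLim + 1) 1) then true
    else McN_a n bLim cLim rest

def McNuggets (n : Int) : Bool :=
  if n < 0 then false
  else
    let aLim := PySem.Int.floordiv n 6
    let bLim := PySem.Int.floordiv n 9
    let cLim := PySem.Int.floordiv n 20
    McN_a n bLim cLim (PySem.List.pyRange 0 (aLim + 1) 1)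

-- ===== PORT B =====
-- helper 'ok(m)': m is 0 or a multiple of 3 that is >= 6
def McN_ok (m : Int) : Bool :=
  decide (0 ≤ m) && (PySem.Int.mod m 3 == 0) && (decide (m = 0) || decide (6 ≤ m))

def McNuggets_alt (n : Int) : Bool :=
  McN_ok n || McN_ok (n - 20) || McN_ok (n - 40)

-- ===== PRECONDITION & SPEC =====
def Spec_McNuggets (n : Int) (out : Bool) : Prop := out = McNuggets_alt n
instance (n : Int) (out : Bool) : Decidable (Spec_McNuggets n out) := by unfold Spec_McNuggets; infer_instance

-- ===== CLAIM (what is proved, stated in full; the proofs are below) =====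
def Claim_equal_McNuggets : Prop := ∀ (n : Int), Dom_McNuggets n → Spec_McNuggets n (McNuggets n)

-- ===== LEMMAS AND PROOFS =====

-- n is a nonnegative integer combination of 6, 9 and 20
def McN_Rep (n : Int) : Prop :=
  ∃ a b c : Int, 0 ≤ a ∧ 0 ≤ b ∧ 0 ≤ c ∧ n = 6 * a + 9 * b + 20 * c

theorem McN_c_iff (n a b : Int) (cs : List Int) :
    McN_c n a b cs = true ↔ ∃ c ∈ cs, n = 6 * a + 9 * b + 20 * c := by
  induction cs with
  | nil => simp [McN_c]
  | cons c rest ih =>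
    simp only [McN_c, List.mem_cons]
    split_ifs with h
    · simp [h]
    · simp [ih]; tauto

theorem McN_b_iff (n a cLim : Int) (bs : List Int) :
    McN_b n a cLim bs = true ↔
      ∃ b ∈ bs, n = 6 * a + 9 * b ∨
        ∃ c ∈ PySem.List.pyRange 0 (cLim + 1) 1, n = 6 * a + 9 * b + 20 * c := by
  induction bs with
  | nil => simp [McN_b]
  | cons b rest ih =>
    simp only [McN_b]
    split_ifs with h1 h2
    · exact iff_of_true rfl ⟨b, by simp, Or.inl h1⟩
    · exact iff_of_true rfl ⟨b, by simp, Or.inr ((McN_c_iff n a b _).mp h2)⟩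
    · rw [ih]
      constructor
      · rintro ⟨x, hx, hh⟩; exact ⟨x, List.mem_cons_of_mem _ hx, hh⟩
      · rintro ⟨x, hx, hh⟩
        rcases List.mem_cons.mp hx with rfl | hx
        · rcases hh with hh | hh
          · exact absurd hh h1
          · exact absurd ((McN_c_iff n a x _).mpr hh) h2
        · exact ⟨x, hx, hh⟩

theorem McN_a_iff (n bLim cLim : Int) (as : List Int) :
    McN_a n bLim cLim as = true ↔
      ∃ a ∈ as, n = 6 * a ∨
        ∃ b ∈ PySem.List.pyRange 0 (bLim + 1) 1, n = 6 * a + 9 * b ∨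
          ∃ c ∈ PySem.List.pyRange 0 (cLim + 1) 1, n = 6 * a + 9 * b + 20 * c := by
  induction as with
  | nil => simp [McN_a]
  | cons a rest ih =>
    simp only [McN_a]
    split_ifs with h1 h2
    · exact iff_of_true rfl ⟨a, by simp, Or.inl h1⟩
    · exact iff_of_true rfl ⟨a, by simp, Or.inr ((McN_b_iff n a cLim _).mp h2)⟩
    · rw [ih]
      constructor
      · rintro ⟨x, hx, hh⟩; exact ⟨x, List.mem_cons_of_mem _ hx, hh⟩
      · rintro ⟨x, hx, hh⟩
        rcases List.mem_cons.mp hx with rfl | hx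
        · rcases hh with hh | hh
          · exact absurd hh h1
          · exact absurd ((McN_b_iff n x cLim _).mpr hh) h2
        · exact ⟨x, hx, hh⟩

theorem McN_le_floordiv {a n k : Int} (hk : 0 < k) (h : k * a ≤ n) :
    a ≤ PySem.Int.floordiv n k := by
  rw [PySem.Int.le_floordiv_iff_mul_le hk]
  linarith

theorem McNuggets_iff_rep (n : Int) : McNuggets n = true ↔ McN_Rep n := by
  unfold McNuggets
  split_ifs with hneg
  · simp only [false_iff]
    rintro ⟨a, b, c, ha, hb, hc, h⟩
    omega
  · rw [McN_a_iff]
    constructor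
    · rintro ⟨a, ha, h⟩
      rw [PySem.List.mem_pyRange_one] at ha
      rcases h with h | ⟨b, hb, h⟩
      · exact ⟨a, 0, 0, ha.1, le_refl 0, le_refl 0, by omega⟩
      · rw [PySem.List.mem_pyRange_one] at hb
        rcases h with h | ⟨c, hc, h⟩
        · exact ⟨a, b, 0, ha.1, hb.1, le_refl 0, by omega⟩
        · rw [PySem.List.mem_pyRange_one] at hc
          exact ⟨a, b, c, ha.1, hb.1, hc.1, h⟩
    · rintro ⟨a, b, c, ha, hb, hc, h⟩
      refine ⟨a, ?_, Or.inr ⟨b, ?_, Or.inr ⟨c, ?_, h⟩⟩⟩ <;>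
        rw [PySem.List.mem_pyRange_one] <;>
        refine ⟨by omega, ?_⟩
      · have := McN_le_floordiv (n := n) (a := a) (k := 6) (by norm_num) (by omega); omega
      · have := McN_le_floordiv (n := n) (a := b) (k := 9) (by omega) (by omega); omega
      · have := McN_le_floordiv (n := n) (a := c) (k := 20) (by omega) (by omega); omega

theorem McN_ok_iff (m : Int) :
    McN_ok m = true ↔ 0 ≤ m ∧ 3 ∣ m ∧ (m = 0 ∨ 6 ≤ m) := by
  unfold McN_ok
  rw [Bool.and_eq_true, Bool.and_eq_true, Bool.or_eq_true, beq_iff_eq,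
    PySem.Int.mod_eq_zero_iff_dvd m 3]
  simp [and_assoc]

theorem McN_ok_rep {m : Int} (h : 0 ≤ m ∧ 3 ∣ m ∧ (m = 0 ∨ 6 ≤ m)) : McN_Rep m := by
  obtain ⟨hm, ⟨k, hk⟩, h6⟩ := h
  rcases Int.emod_two_eq_zero_or_one k with hp | hp
  · exact ⟨k / 2, 0, 0, by omega, le_refl 0, le_refl 0, by omega⟩
  · exact ⟨(k - 3) / 2, 1, 0, by omega, by norm_num, le_refl 0, by omega⟩

theorem McN_rep_add20 {m : Int} (h : McN_Rep m) : McN_Rep (m + 20) := by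
  obtain ⟨a, b, c, ha, hb, hc, hm⟩ := h
  exact ⟨a, b, c + 1, ha, hb, by omega, by omega⟩

theorem McNuggets_alt_iff_rep (n : Int) : McNuggets_alt n = true ↔ McN_Rep n := by
  unfold McNuggets_alt
  rw [Bool.or_eq_true, Bool.or_eq_true, McN_ok_iff, McN_ok_iff, McN_ok_iff]
  constructor
  · rintro ((h | h) | h)
    · exact McN_ok_rep h
    · have h' := McN_rep_add20 (McN_ok_rep h)
      rwa [show n - 20 + 20 = n by ring] at h'
    · have h' := McN_rep_add20 (McN_rep_add20 (McN_ok_rep h))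
      rwa [show n - 40 + 20 + 20 = n by ring] at h' 
  · rintro ⟨a, b, c, ha, hb, hc, h⟩
    have hc3 : c % 3 = 0 ∨ c % 3 = 1 ∨ c % 3 = 2 := by omega
    rcases hc3 with h3 | h3 | h3
    · left; left; omega
    · left; right; omega
    · right; omega

-- ===== VERDICT (by name: the statement is the Claim_ definition above) =====
theorem McNuggets_spec : Claim_equal_McNuggets := by
  intro n _
  unfold Spec_McNuggets
  have h := (McNuggets_iff_rep n).trans (McNuggets_alt_iff_rep n).symm
  cases hA : McNuggets n <;> cases hB : McNuggets_alt n <;> simp_all
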